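-- pv_equiv track=rewrite | github.com/Jusearco/fundamentos-trabajos | Taller_2/ejercicio4.py | menor_factor_para_cuadrado_perfecto
-- ===== SOURCE A (Python) =====
-- def menor_factor_para_cuadrado_perfecto(n):
--     factores = {}
--     i = 2
--     while i * i <= n:
--         while n % i == 0:
--             factores[i] = factores.get(i, 0) + 1
--             n //= i
--         i += 1
--     if n > 1:
--         factores[n] = factores.get(n, 0) + 1
--
--     resultado = 1
--     for factor, cantidad in factores.items():
--         if cantidad % 2 != 0:
--             resultado *= factor
--     return resultado
-- ===== SOURCE B (Python) =====
-- def menor_factor_para_cuadrado_perfecto(n):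
--     if n < 2:
--         return 1
--     mejor = 1
--     d = 1
--     while d * d <= n:
--         if n % (d * d) == 0:
--             mejor = d
--         d += 1
--     return n // (mejor * mejor)
-- ===== Notes on version B (the rewrite author's own statement) =====
-- stated objective: alternative
-- what changed: B does no prime factorization at all: it scans d = 1.. while d*d <= n for the largest d with d*d dividing n and returns n // (d*d) (the squarefree part), instead of A's trial-division factorization with an exponent dictionary and a product over odd-exponent primes.
import Mathlib
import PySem

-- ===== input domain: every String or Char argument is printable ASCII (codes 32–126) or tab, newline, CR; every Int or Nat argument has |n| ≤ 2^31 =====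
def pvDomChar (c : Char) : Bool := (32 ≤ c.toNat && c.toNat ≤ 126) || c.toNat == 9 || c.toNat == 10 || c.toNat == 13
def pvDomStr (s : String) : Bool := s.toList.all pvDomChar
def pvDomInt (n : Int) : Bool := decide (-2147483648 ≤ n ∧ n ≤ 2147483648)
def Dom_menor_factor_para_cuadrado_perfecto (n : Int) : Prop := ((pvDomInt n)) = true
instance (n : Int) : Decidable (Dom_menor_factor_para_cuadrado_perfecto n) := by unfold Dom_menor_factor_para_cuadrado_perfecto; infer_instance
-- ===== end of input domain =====

-- B uses a different algorithm: instead of A's trial-division prime factorization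
-- with an exponent dictionary, it scans for the largest d with d*d dividing n and
-- returns n // (d*d) (objective: alternative, same asymptotic cost).
-- Loops are ported with a fuel counter that only makes them total; the fuel
-- n.toNat + 1 is enough for every input, so each port computes exactly what its
-- Python computes.

-- ===== PORT A =====
-- inner loop of A: 'while n % i == 0', counting each division into the dict
def pvInnerA (fuel : Nat) (n i : Int) (d : PySem.Dict Int Int) : Int × PySem.Dict Int Int :=
  match fuel with
  | 0 => (n, d)
  | f + 1 =>
    if PySem.Int.mod n i = 0 then
      pvInnerA f (PySem.Int.floordiv n i) i (d.insert i (d.getD i 0 + 1))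
    else (n, d)

-- outer loop of A: 'while i * i <= n'
def pvOuterA (fuel : Nat) (n i : Int) (d : PySem.Dict Int Int) : Int × PySem.Dict Int Int :=
  match fuel with
  | 0 => (n, d)
  | f + 1 =>
    if i * i ≤ n then
      let p := pvInnerA (n.toNat + 1) n i d
      pvOuterA f p.1 (i + 1) p.2
    else (n, d)

def menor_factor_para_cuadrado_perfecto (n : Int) : Int :=
  let p := pvOuterA (n.toNat + 1) n 2 PySem.Dict.empty
  let d := if p.1 > 1 then p.2.insert p.1 (p.2.getD p.1 0 + 1) else p.2
  d.items.foldl (fun r q => if PySem.Int.mod q.2 2 ≠ 0 then r * q.1 else r) 1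

-- ===== PORT B =====
-- B's single loop: 'while d * d <= n: if n % (d*d) == 0: mejor = d; d += 1'
def pvLoopB (fuel : Nat) (n d mejor : Int) : Int :=
  match fuel with
  | 0 => mejor
  | f + 1 =>
    if d * d ≤ n then
      pvLoopB f n (d + 1) (if PySem.Int.mod n (d * d) = 0 then d else mejor)
    else mejor

def menor_factor_para_cuadrado_perfecto_alt (n : Int) : Int :=
  if n < 2 then 1
  else
    let mejor := pvLoopB (n.toNat + 1) n 1 1
    PySem.Int.floordiv n (mejor * mejor)

-- ===== PRECONDITION & SPEC =====
def Spec_menor_factor_para_cuadrado_perfecto (n : Int) (out : Int) : Prop := out = menor_factor_para_cuadrado_perfecto_alt n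
instance (n : Int) (out : Int) : Decidable (Spec_menor_factor_para_cuadrado_perfecto n out) := by unfold Spec_menor_factor_para_cuadrado_perfecto; infer_instance

-- ===== CLAIM (what is proved, stated in full; the proofs are below) =====
def Claim_equal_menor_factor_para_cuadrado_perfecto : Prop := ∀ (n : Int), Dom_menor_factor_para_cuadrado_perfecto n → Spec_menor_factor_para_cuadrado_perfecto n (menor_factor_para_cuadrado_perfecto n)

-- ===== LEMMAS AND PROOFS =====

-- Proof-layer bridge: an accumulator version of A's trial division (no dict),
-- used only to factor the proof: A = acc version = B.
def pvInnerAcc (fuel : Nat) (n i : Int) (e : Int) : Int × Int :=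
  match fuel with
  | 0 => (n, e)
  | f + 1 =>
    if PySem.Int.mod n i = 0 then
      pvInnerAcc f (PySem.Int.floordiv n i) i (e + 1)
    else (n, e)

def pvOuterAcc (fuel : Nat) (n i : Int) (r : Int) : Int × Int :=
  match fuel with
  | 0 => (n, r)
  | f + 1 =>
    if i * i ≤ n then
      let q := pvInnerAcc (n.toNat + 1) n i 0
      pvOuterAcc f q.1 (i + 1) (if PySem.Int.mod q.2 2 = 1 then r * i else r)
    else (n, r)

def pvAccOut (n : Int) : Int :=
  let p := pvOuterAcc (n.toNat + 1) n 2 1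
  if p.1 > 1 then p.2 * p.1 else p.2

-- product of the factors with odd multiplicity, as A's final loop computes it
def pvOddProd (l : List (Int × Int)) : Int :=
  l.foldl (fun r q => if PySem.Int.mod q.2 2 ≠ 0 then r * q.1 else r) 1

theorem pvFoldl_oddProd_append (l : List (Int × Int)) (x : Int × Int) :
    pvOddProd (l ++ [x]) =
      if PySem.Int.mod x.2 2 ≠ 0 then pvOddProd l * x.1 else pvOddProd l := by
  simp [pvOddProd, List.foldl_append]

theorem pvMod_self_eq_zero (m : Int) : PySem.Int.mod m m = 0 :=
  (PySem.Int.mod_eq_zero_iff_dvd m m).mpr (dvd_refl m)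

theorem pvInsert_insert_same (d : PySem.Dict Int Int) (k a b : Int) :
    (d.insert k a).insert k b = d.insert k b := by
  apply PySem.Dict.ext
  by_cases hc : d.contains k = true
  · rw [PySem.Dict.items_insert_of_contains _ _ (by simp [PySem.Dict.contains_insert_self]),
        PySem.Dict.items_insert_of_contains _ _ hc,
        PySem.Dict.items_insert_of_contains _ _ hc, List.map_map]
    apply List.map_congr_left
    intro p _
    by_cases hp : p.1 = k <;> simp [hp]
  · rw [PySem.Dict.items_insert_of_contains _ _ (by simp [PySem.Dict.contains_insert_self]),
        PySem.Dict.items_insert_of_not_contains _ _ (by simp [hc]),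
        PySem.Dict.items_insert_of_not_contains _ _ (by simp [hc]),
        List.map_append]
    have hmem : ∀ p ∈ d.items, p.1 ≠ k := by
      intro p hp hpk
      exact hc ((PySem.Dict.contains_iff_mem_keys d k).mpr
        (by simp only [PySem.Dict.keys, List.mem_map]; exact ⟨p, hp, hpk⟩))
    have hid : List.map (fun p => if (p.1 == k) = true then (k, b) else p) d.items
        = List.map id d.items := by
      apply List.map_congr_left
      intro p hp
      simp [hmem p hp]
    rw [hid, List.map_id]
    simp

-- one exact division step: n // i is positive, strictly smaller, and divides n
theorem pvDivStep (n i : Int) (hn : 0 < n) (hi : 2 ≤ i) (h : PySem.Int.mod n i = 0) :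
    0 < PySem.Int.floordiv n i ∧ PySem.Int.floordiv n i < n ∧ PySem.Int.floordiv n i ∣ n := by
  have hd : i ∣ n := (PySem.Int.mod_eq_zero_iff_dvd n i).mp h
  rw [PySem.Int.floordiv_eq_ediv_of_pos (by omega)]
  have hq : n / i * i = n := Int.ediv_mul_cancel hd
  have h1 : 1 ≤ n / i := by
    have := Int.le_of_dvd hn hd
    have := (Int.le_ediv_iff_mul_le (a := 1) (b := n) (c := i) (by omega)).mpr (by omega)
    omega
  refine ⟨by omega, by nlinarith, ⟨i, hq.symm⟩⟩

theorem pvInnerA_fst (f : Nat) (n i : Int) (d : PySem.Dict Int Int)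
    (hn : 0 < n) (hi : 2 ≤ i) (hf : n.toNat < f) :
    0 < (pvInnerA f n i d).1 ∧ (pvInnerA f n i d).1 ∣ n ∧
    PySem.Int.mod (pvInnerA f n i d).1 i ≠ 0 := by
  induction f generalizing n d with
  | zero => omega
  | succ f ih =>
    rw [pvInnerA]
    by_cases h : PySem.Int.mod n i = 0
    · rw [if_pos h]
      obtain ⟨hm0, hmlt, hmdvd⟩ := pvDivStep n i hn hi h
      obtain ⟨ih1, ih2, ih3⟩ := ih (PySem.Int.floordiv n i) _ hm0 (by omega)
      exact ⟨ih1, dvd_trans ih2 hmdvd, ih3⟩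
    · rw [if_neg h]
      exact ⟨hn, dvd_refl n, h⟩

-- lockstep relation between A's inner loop and the accumulator inner loop
theorem pvInner_rel (f : Nat) (n i : Int) (d : PySem.Dict Int Int) (e : Int) :
    (pvInnerAcc f n i e).1 = (pvInnerA f n i d).1 ∧
    ∃ k : Int, (pvInnerAcc f n i e).2 = e + k ∧ 0 ≤ k ∧
      ((k = 0 ∧ (pvInnerA f n i d).2 = d ∧ (pvInnerA f n i d).1 = n) ∨
       (1 ≤ k ∧ (pvInnerA f n i d).2 = d.insert i (d.getD i 0 + k))) := by
  induction f generalizing n d e with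
  | zero =>
    exact ⟨rfl, 0, by simp [pvInnerAcc], by omega, Or.inl ⟨rfl, rfl, rfl⟩⟩
  | succ f ih =>
    rw [pvInnerA, pvInnerAcc]
    by_cases h : PySem.Int.mod n i = 0
    · rw [if_pos h, if_pos h]
      obtain ⟨h1, k', hk'e, hk'0, hcase⟩ :=
        ih (PySem.Int.floordiv n i) (d.insert i (d.getD i 0 + 1)) (e + 1)
      refine ⟨h1, k' + 1, by omega, by omega, Or.inr ?_⟩
      rcases hcase with ⟨hk0, hd, _⟩ | ⟨hk1, hd⟩
      · subst hk0; rw [hd]; exact ⟨by omega, by rw [zero_add]⟩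
      · refine ⟨by omega, ?_⟩
        rw [hd, PySem.Dict.getD_insert_self, pvInsert_insert_same]
        have : d.getD i 0 + 1 + k' = d.getD i 0 + (k' + 1) := by ring
        rw [this]
    · rw [if_neg h, if_neg h]
      exact ⟨rfl, 0, by omega, by omega, Or.inl ⟨rfl, rfl, rfl⟩⟩

-- lockstep relation between A's outer loop and the accumulator outer loop
theorem pvOuter_rel (f : Nat) (n i : Int) (d : PySem.Dict Int Int) (r : Int)
    (hi : 2 ≤ i)
    (hr : r = pvOddProd d.items)
    (hinv : ∀ p ∈ d.items, 2 ≤ p.1 ∧ p.1 < i ∧ PySem.Int.mod n p.1 ≠ 0) :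
    (pvOuterAcc f n i r).1 = (pvOuterA f n i d).1 ∧
    (pvOuterAcc f n i r).2 = pvOddProd (pvOuterA f n i d).2.items ∧
    (∀ p ∈ (pvOuterA f n i d).2.items,
      2 ≤ p.1 ∧ PySem.Int.mod (pvOuterA f n i d).1 p.1 ≠ 0) := by
  induction f generalizing n i d r with
  | zero =>
    refine ⟨rfl, hr, ?_⟩
    intro q hq
    obtain ⟨hq2, _, hqn⟩ := hinv q hq
    exact ⟨hq2, hqn⟩
  | succ f ih =>
    rw [pvOuterA, pvOuterAcc]
    by_cases h : i * i ≤ n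
    · rw [if_pos h, if_pos h]
      simp only []
      have hn : (0:Int) < n := by nlinarith
      obtain ⟨h1, k, hke, hk0, hcase⟩ := pvInner_rel (n.toNat + 1) n i d 0
      obtain ⟨hApos, hAdvd, hAmod⟩ :=
        pvInnerA_fst (n.toNat + 1) n i d hn hi (by omega)
      have hkeep : ∀ q : Int × Int, q ∈ d.items → PySem.Int.mod n q.1 ≠ 0 →
          PySem.Int.mod (pvInnerA (n.toNat + 1) n i d).1 q.1 ≠ 0 := by
        intro q hq hqn hcon
        exact hqn ((PySem.Int.mod_eq_zero_iff_dvd n q.1).mpr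
          (dvd_trans ((PySem.Int.mod_eq_zero_iff_dvd _ q.1).mp hcon) hAdvd))
      rw [h1]
      rcases hcase with ⟨hk0', hdeq, hneq⟩ | ⟨hk1, hdeq⟩
      · have hB2 : (pvInnerAcc (n.toNat + 1) n i 0).2 = 0 := by omega
        rw [hB2, if_neg (by decide : ¬ PySem.Int.mod (0:Int) 2 = 1)]
        exact ih _ _ _ r (by omega) (by rw [hr, hdeq])
          (by intro q hq
              rw [hdeq] at hq
              obtain ⟨hq2, hqi, hqn⟩ := hinv q hq
              rw [hneq]
              exact ⟨hq2, by omega, hqn⟩)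
      · have hnotmem : d.contains i = false := by
          by_contra hcon
          have hmem : i ∈ d.keys := (PySem.Dict.contains_iff_mem_keys d i).mp
            (by revert hcon; cases h' : d.contains i <;> simp)
          simp only [PySem.Dict.keys, List.mem_map] at hmem
          obtain ⟨q, hq, hqi⟩ := hmem
          have := (hinv q hq).2.1
          omega
        have hgd : d.getD i 0 = 0 := PySem.Dict.getD_of_not_contains d 0 hnotmem
        have hitems : (pvInnerA (n.toNat + 1) n i d).2.items = d.items ++ [(i, k)] := by
          rw [hdeq, hgd, zero_add]
          exact PySem.Dict.items_insert_of_not_contains d k hnotmem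
        have hB2 : (pvInnerAcc (n.toNat + 1) n i 0).2 = k := by omega
        have hmodk : PySem.Int.mod k 2 = 0 ∨ PySem.Int.mod k 2 = 1 := by
          have := PySem.Int.mod_nonneg k (b := 2) (by omega)
          have := PySem.Int.mod_lt k (b := 2) (by omega)
          omega
        have hstep : (if PySem.Int.mod (pvInnerAcc (n.toNat + 1) n i 0).2 2 = 1 then r * i else r)
            = pvOddProd (pvInnerA (n.toNat + 1) n i d).2.items := by
          rw [hB2, hitems, pvFoldl_oddProd_append, ← hr]
          rcases hmodk with hm | hm <;> rw [hm] <;> simp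
        refine ih _ _ _ _ (by omega) hstep ?_
        intro q hq
        rw [hitems, List.mem_append] at hq
        rcases hq with hq | hq
        · obtain ⟨hq2, hqi, hqn⟩ := hinv q hq
          exact ⟨hq2, by omega, hkeep q hq hqn⟩
        · simp only [List.mem_singleton] at hq
          subst hq
          exact ⟨hi, by omega, hAmod⟩
    · rw [if_neg h, if_neg h]
      refine ⟨rfl, hr, ?_⟩
      intro q hq
      obtain ⟨hq2, _, hqn⟩ := hinv q hq
      exact ⟨hq2, hqn⟩

-- A's port equals the accumulator bridge
theorem pvA_eq_acc (n : Int) : menor_factor_para_cuadrado_perfecto n = pvAccOut n := by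
  obtain ⟨h1, h2, hinv⟩ := pvOuter_rel (n.toNat + 1) n 2 PySem.Dict.empty 1 (by norm_num)
    (by rfl) (by intro q hq; simp [PySem.Dict.empty] at hq)
  show (if (pvOuterA (n.toNat + 1) n 2 PySem.Dict.empty).1 > 1
      then (pvOuterA (n.toNat + 1) n 2 PySem.Dict.empty).2.insert
        (pvOuterA (n.toNat + 1) n 2 PySem.Dict.empty).1
        ((pvOuterA (n.toNat + 1) n 2 PySem.Dict.empty).2.getD
          (pvOuterA (n.toNat + 1) n 2 PySem.Dict.empty).1 0 + 1)
      else (pvOuterA (n.toNat + 1) n 2 PySem.Dict.empty).2).items.foldl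
      (fun r q => if PySem.Int.mod q.2 2 ≠ 0 then r * q.1 else r) 1
    = (if (pvOuterAcc (n.toNat + 1) n 2 1).1 > 1
       then (pvOuterAcc (n.toNat + 1) n 2 1).2 * (pvOuterAcc (n.toNat + 1) n 2 1).1
       else (pvOuterAcc (n.toNat + 1) n 2 1).2)
  set A := pvOuterA (n.toNat + 1) n 2 PySem.Dict.empty with hA
  set B := pvOuterAcc (n.toNat + 1) n 2 1 with hB
  rw [h1]
  by_cases hg : A.1 > 1
  · rw [if_pos hg, if_pos hg]
    have hnot : A.2.contains A.1 = false := by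
      by_contra hcon
      have hmem : A.1 ∈ A.2.keys := (PySem.Dict.contains_iff_mem_keys A.2 A.1).mp
        (by revert hcon; cases h' : A.2.contains A.1 <;> simp)
      simp only [PySem.Dict.keys, List.mem_map] at hmem
      obtain ⟨q, hq, hqi⟩ := hmem
      have := (hinv q hq).2
      rw [hqi] at this
      exact this (pvMod_self_eq_zero A.1)
    rw [PySem.Dict.getD_of_not_contains A.2 0 hnot, zero_add,
        PySem.Dict.items_insert_of_not_contains A.2 1 hnot]
    show pvOddProd (A.2.items ++ [(A.1, 1)]) = B.2 * A.1
    rw [pvFoldl_oddProd_append, if_pos (by decide : PySem.Int.mod (1:Int) 2 ≠ 0), h2]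
  · rw [if_neg hg, if_neg hg]
    show pvOddProd A.2.items = B.2
    exact h2.symm

-- full specification of the accumulator inner loop
theorem pvInnerAcc_spec (f : Nat) (m i e : Int) (hm : 0 < m) (hi : 2 ≤ i)
    (hf : m.toNat < f) :
    ∃ k : Nat, (pvInnerAcc f m i e).2 = e + (k : Int) ∧
      m = i ^ k * (pvInnerAcc f m i e).1 ∧
      ¬ i ∣ (pvInnerAcc f m i e).1 ∧ 0 < (pvInnerAcc f m i e).1 := by
  induction f generalizing m e with
  | zero => omega
  | succ f ih =>
    rw [pvInnerAcc]
    by_cases h : PySem.Int.mod m i = 0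
    · rw [if_pos h]
      obtain ⟨hp, hlt, _⟩ := pvDivStep m i hm hi h
      have hid : i ∣ m := (PySem.Int.mod_eq_zero_iff_dvd m i).mp h
      have hfd : PySem.Int.floordiv m i = m / i :=
        PySem.Int.floordiv_eq_ediv_of_pos (by omega)
      have hmul : i * PySem.Int.floordiv m i = m := by
        rw [hfd]; exact Int.mul_ediv_cancel' hid
      obtain ⟨k, hk1, hk2, hk3, hk4⟩ := ih (PySem.Int.floordiv m i) (e + 1) hp (by omega)
      refine ⟨k + 1, by push_cast [hk1]; ring, ?_, hk3, hk4⟩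
      rw [pow_succ]
      calc m = i * PySem.Int.floordiv m i := hmul.symm
        _ = i * (i ^ k * (pvInnerAcc f (PySem.Int.floordiv m i) i (e + 1)).1) := by rw [← hk2]
        _ = i ^ k * i * (pvInnerAcc f (PySem.Int.floordiv m i) i (e + 1)).1 := by ring
    · rw [if_neg h]
      refine ⟨0, by simp, by simp, ?_, hm⟩
      intro hdvd
      exact h ((PySem.Int.mod_eq_zero_iff_dvd m i).mpr hdvd)

-- an integer ≥ 2 with no divisor in [2, i) dividing it ... primality helpers
theorem pvPrimeOfNoDvdLt (i : Int) (h2 : 2 ≤ i)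
    (h : ∀ j : Int, 2 ≤ j → j < i → ¬ j ∣ i) : Prime i := by
  rw [Int.prime_iff_natAbs_prime]
  rw [Nat.prime_def_lt']
  refine ⟨by omega, ?_⟩
  intro m hm hlt hdvd
  have habs : (i.natAbs : Int) = i := Int.natAbs_of_nonneg (by omega)
  have hj : (m : Int) ∣ i := by
    rw [← habs]; exact_mod_cast hdvd
  exact h (m : Int) (by exact_mod_cast hm) (by omega) hj

theorem pvPrimeOfNoSmallDvd (p : Int) (h2 : 2 ≤ p)
    (h : ∀ j : Int, 2 ≤ j → j * j ≤ p → ¬ j ∣ p) : Prime p := by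
  rw [Int.prime_iff_natAbs_prime]
  rw [Nat.prime_def_lt']
  refine ⟨by omega, ?_⟩
  intro m hm hlt hdvd
  have habs : (p.natAbs : Int) = p := Int.natAbs_of_nonneg (by omega)
  have hj : (m : Int) ∣ p := by rw [← habs]; exact_mod_cast hdvd
  obtain ⟨k, hk⟩ := id hj
  have hm2 : (2 : Int) ≤ (m : Int) := by exact_mod_cast hm
  have hmp : (m : Int) < p := by omega
  have hk2 : 2 ≤ k := by nlinarith [hk, hm2, hmp]
  have hkdvd : k ∣ p := ⟨(m : Int), by rw [hk]; ring⟩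
  by_cases hc : (m : Int) * (m : Int) ≤ p
  · exact h _ hm2 hc hj
  · push_neg at hc
    have hkm : k < (m : Int) := by nlinarith [hk]
    exact h k hk2 (by nlinarith [hk]) hkdvd

-- full specification of the accumulator outer loop: the accumulated factor u is
-- squarefree, coprime to the leftover, and n = u * s^2 * leftover
theorem pvOuterAcc_spec (f : Nat) (m i r : Int)
    (hm : 0 < m) (hi : 2 ≤ i)
    (hf : m.toNat + 2 ≤ f + i.toNat)
    (hnd : ∀ j : Int, 2 ≤ j → j < i → ¬ j ∣ m) :
    ∃ u s : Int, 0 < u ∧ 0 < s ∧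
      (pvOuterAcc f m i r).2 = r * u ∧
      u * s ^ 2 * (pvOuterAcc f m i r).1 = m ∧
      0 < (pvOuterAcc f m i r).1 ∧
      Squarefree u ∧
      IsRelPrime u (pvOuterAcc f m i r).1 ∧
      (∀ j : Int, 2 ≤ j → j * j ≤ (pvOuterAcc f m i r).1 →
        ¬ j ∣ (pvOuterAcc f m i r).1) := by
  induction f generalizing m i r with
  | zero =>
    simp only [pvOuterAcc]
    refine ⟨1, 1, one_pos, one_pos, (mul_one r).symm, by simp, hm, squarefree_one,
      isRelPrime_one_left, ?_⟩
    intro j hj hjm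
    have him : m + 2 ≤ i := by omega
    exact hnd j hj (by nlinarith)
  | succ f ih =>
    rw [pvOuterAcc]
    by_cases h : i * i ≤ m
    · rw [if_pos h]
      simp only []
      obtain ⟨k, hk1, hk2, hk3, hk4⟩ := pvInnerAcc_spec (m.toNat + 1) m i 0 hm hi (by omega)
      set q := pvInnerAcc (m.toNat + 1) m i 0 with hq
      have hprime : k = 0 ∨ Prime i := by
        rcases Nat.eq_zero_or_pos k with hk | hk
        · exact Or.inl hk
        · refine Or.inr (pvPrimeOfNoDvdLt i hi ?_)
          intro j hj hji hjdvd
          have : i ∣ m := by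
            rw [hk2]
            exact Dvd.dvd.mul_right (dvd_pow_self i (by omega)) _
          exact hnd j hj hji (hjdvd.trans this)
      have hnd' : ∀ j : Int, 2 ≤ j → j < i + 1 → ¬ j ∣ q.1 := by
        intro j hj hji hjdvd
        by_cases hji' : j < i
        · refine hnd j hj hji' (hjdvd.trans ?_)
          rw [hk2]; exact Dvd.intro_left _ rfl
        · have : j = i := by omega
          exact hk3 (this ▸ hjdvd)
      have hqm : q.1 ≤ m := Int.le_of_dvd hm ⟨i ^ k, by rw [hk2]; ring⟩
      set a := k / 2 with ha
      have hmodq : PySem.Int.mod q.2 2 = ((k % 2 : Nat) : Int) := by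
        rw [PySem.Int.mod_eq_emod_of_pos (by omega), hk1]
        omega
      by_cases hpar : k % 2 = 1
      · -- odd exponent: i is prime, u gains i, s gains i^a
        have hcond : PySem.Int.mod q.2 2 = 1 := by rw [hmodq, hpar]; rfl
        rw [if_pos hcond]
        obtain ⟨u', s', hu'p, hs'p, hrec1, hrec2, hrec3, hrec4, hrec5, hrec6⟩ :=
          ih q.1 (i + 1) (r * i) hk4 (by omega) (by omega) hnd'
        have hip : Prime i := hprime.resolve_left (by omega)
        have hu'q : u' ∣ q.1 := ⟨s' ^ 2 * (pvOuterAcc f q.1 (i + 1) (r * i)).1,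
          by linear_combination -hrec2⟩
        have hR1q : (pvOuterAcc f q.1 (i + 1) (r * i)).1 ∣ q.1 := ⟨u' * s' ^ 2,
          by linear_combination -hrec2⟩
        have hiu' : ¬ i ∣ u' := fun hc => hk3 (hc.trans hu'q)
        have hiR1 : ¬ i ∣ (pvOuterAcc f q.1 (i + 1) (r * i)).1 :=
          fun hc => hk3 (hc.trans hR1q)
        refine ⟨i * u', i ^ a * s', by positivity, by positivity,
          by rw [hrec1]; ring, ?_, hrec3, ?_, ?_, hrec6⟩
        · have hkab : k = 2 * a + 1 := by omega
          rw [hk2, hkab]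
          linear_combination (i ^ (2 * a + 1)) * hrec2
        · exact squarefree_mul_iff.mpr
            ⟨hip.irreducible.isRelPrime_iff_not_dvd.mpr hiu', hip.squarefree, hrec4⟩
        · exact IsRelPrime.mul_left (hip.irreducible.isRelPrime_iff_not_dvd.mpr hiR1) hrec5
      · -- even exponent: u unchanged, s gains i^a
        have hcond : ¬ PySem.Int.mod q.2 2 = 1 := by
          rw [hmodq]
          have hk0 : k % 2 = 0 := by omega
          rw [hk0]
          decide
        rw [if_neg hcond]
        obtain ⟨u', s', hu'p, hs'p, hrec1, hrec2, hrec3, hrec4, hrec5, hrec6⟩ :=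
          ih q.1 (i + 1) r hk4 (by omega) (by omega) hnd'
        refine ⟨u', i ^ a * s', hu'p, by positivity, hrec1, ?_, hrec3, hrec4, hrec5, hrec6⟩
        have hkab : k = 2 * a := by omega
        rw [hk2, hkab]
        linear_combination (i ^ (2 * a)) * hrec2
    · rw [if_neg h]
      refine ⟨1, 1, one_pos, one_pos, (mul_one r).symm, by ring_nf, hm, squarefree_one,
        isRelPrime_one_left, ?_⟩
      intro j hj hjm hjdvd
      have hji : j < i := by nlinarith
      exact hnd j hj hji hjdvd

-- characterization of the accumulator output: the squarefree cofactor of n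
theorem pvAcc_char (n : Int) (hn : 2 ≤ n) :
    ∃ s : Int, 0 < s ∧ pvAccOut n * s ^ 2 = n ∧ Squarefree (pvAccOut n) ∧ 0 < pvAccOut n := by
  obtain ⟨u, s, hup, hsp, hr, heq, hpos, hsf, hrel, hnodvd⟩ :=
    pvOuterAcc_spec (n.toNat + 1) n 2 1 (by omega) (by norm_num) (by omega)
      (by intro j hj hji; omega)
  set p := pvOuterAcc (n.toNat + 1) n 2 1 with hp
  unfold pvAccOut
  rw [← hp]
  by_cases hg : p.1 > 1
  · rw [if_pos hg]
    have hprime : Prime p.1 := pvPrimeOfNoSmallDvd p.1 (by omega) hnodvd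
    refine ⟨s, hsp, ?_, ?_, by nlinarith⟩
    · rw [hr]; rw [← heq]; ring
    · rw [hr, one_mul]
      exact squarefree_mul_iff.mpr ⟨hrel, hsf, hprime.squarefree⟩
  · rw [if_neg hg]
    have hp1 : p.1 = 1 := by omega
    refine ⟨s, hsp, ?_, ?_, by rw [hr]; omega⟩
    · rw [hr, one_mul, ← heq, hp1]; ring
    · rw [hr, one_mul]; exact hsf

-- key number-theoretic fact: d² ∣ u·s² with u squarefree forces d ∣ s
theorem pvKeyNat (u s d : Nat) (hu : Squarefree u) (hs : 0 < s)
    (h : d * d ∣ u * (s * s)) : d ∣ s := by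
  rcases Nat.eq_zero_or_pos d with hd | hd
  · subst hd
    simp only [Nat.zero_mul, Nat.zero_dvd, Nat.mul_eq_zero] at h
    rcases h with h | h
    · exact absurd h hu.ne_zero
    · omega
  · set g := Nat.gcd d s with hg
    have hgpos : 0 < g := Nat.gcd_pos_of_pos_right d hs
    obtain ⟨d', hd'⟩ : g ∣ d := Nat.gcd_dvd_left d s
    obtain ⟨s', hs'⟩ : g ∣ s := Nat.gcd_dvd_right d s
    have hcop : Nat.Coprime (d / g) (s / g) := Nat.coprime_div_gcd_div_gcd hgpos
    have hdg : d / g = d' := by rw [hd']; exact Nat.mul_div_cancel_left d' hgpos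
    have hsg : s / g = s' := by rw [hs']; exact Nat.mul_div_cancel_left s' hgpos
    rw [hdg, hsg] at hcop
    have h2 : d' * d' * (g * g) ∣ u * (s' * s') * (g * g) := by
      have : (g * d') * (g * d') = d' * d' * (g * g) := by ring
      rw [hd', hs'] at h
      calc d' * d' * (g * g) = (g * d') * (g * d') := by ring
        _ ∣ u * ((g * s') * (g * s')) := h
        _ = u * (s' * s') * (g * g) := by ring
    have h3 : d' * d' ∣ u * (s' * s') :=
      (Nat.mul_dvd_mul_iff_right (Nat.mul_pos hgpos hgpos)).mp h2
    have hcop2 : Nat.Coprime (d' * d') (s' * s') :=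
      Nat.Coprime.mul_left (hcop.mul_right hcop) (hcop.mul_right hcop)
    have h4 : d' * d' ∣ u := hcop2.dvd_of_dvd_mul_right h3
    have hd1 : d' = 1 := Nat.isUnit_iff.mp (hu d' h4)
    rw [hd', hd1, Nat.mul_one]
    exact ⟨s', hs'⟩

theorem pvKeyInt (u s d : Int) (hu : Squarefree u) (hs : 0 < s) (hd : 1 ≤ d)
    (h : d * d ∣ u * (s * s)) : d ∣ s := by
  rw [← Int.natAbs_dvd_natAbs]
  refine pvKeyNat u.natAbs s.natAbs d.natAbs (Int.squarefree_natAbs.mpr hu) (by omega) ?_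
  have := Int.natAbs_dvd_natAbs.mpr h
  simpa [Int.natAbs_mul] using this

-- full specification of B's scan: it returns the largest d with d*d ∣ n
theorem pvLoopB_spec (f : Nat) (n d mejor : Int) (hn : 2 ≤ n) (hd : 1 ≤ d)
    (hb : 1 ≤ mejor) (hbdvd : mejor * mejor ∣ n)
    (hmax : ∀ j : Int, mejor < j → j < d → ¬ j * j ∣ n)
    (hf : n.toNat + 2 ≤ f + d.toNat) :
    1 ≤ pvLoopB f n d mejor ∧ pvLoopB f n d mejor * pvLoopB f n d mejor ∣ n ∧
    ∀ j : Int, 1 ≤ j → j * j ∣ n → j ≤ pvLoopB f n d mejor := by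
  induction f generalizing d mejor with
  | zero =>
    simp only [pvLoopB]
    refine ⟨hb, hbdvd, ?_⟩
    intro j hj hjd
    have hjn : j * j ≤ n := Int.le_of_dvd (by omega) hjd
    have hjj : j ≤ j * j := by nlinarith
    have hjln : j ≤ n := le_trans hjj hjn
    have hjlt : j < d := by omega
    by_contra hc
    exact hmax j (by omega) hjlt hjd
  | succ f ih =>
    rw [pvLoopB]
    by_cases h : d * d ≤ n
    · rw [if_pos h]
      by_cases hmod : PySem.Int.mod n (d * d) = 0
      · rw [if_pos hmod]
        exact ih (d + 1) d (by omega) (by omega)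
          ((PySem.Int.mod_eq_zero_iff_dvd n (d * d)).mp hmod)
          (by intro j h1 h2 _; omega) (by omega)
      · rw [if_neg hmod]
        refine ih (d + 1) mejor (by omega) hb hbdvd ?_ (by omega)
        intro j h1 h2 hjd
        by_cases hji : j < d
        · exact hmax j h1 hji hjd
        · have hje : j = d := by omega
          subst hje
          exact hmod ((PySem.Int.mod_eq_zero_iff_dvd n (j * j)).mpr hjd)
    · rw [if_neg h]
      refine ⟨hb, hbdvd, ?_⟩
      intro j hj hjd
      have hjn : j * j ≤ n := Int.le_of_dvd (by omega) hjd
      have hjlt : j < d := by nlinarith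
      by_contra hc
      exact hmax j (by omega) hjlt hjd

-- the accumulator output equals B's output
theorem pvAcc_eq_alt (n : Int) : pvAccOut n = menor_factor_para_cuadrado_perfecto_alt n := by
  by_cases hn : n < 2
  · have h4 : ¬ ((2:Int) * 2 ≤ n) := by omega
    rw [menor_factor_para_cuadrado_perfecto_alt, if_pos hn]
    unfold pvAccOut
    rw [pvOuterAcc, if_neg h4]
    simp only []
    rw [if_neg (by omega : ¬ n > 1)]
  · have hn2 : 2 ≤ n := by omega
    obtain ⟨s, hs, hFs, hsf, hFpos⟩ := pvAcc_char n hn2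
    set F := pvAccOut n with hFdef
    obtain ⟨hR1, hRdvd, hRmax⟩ :=
      pvLoopB_spec (n.toNat + 1) n 1 1 hn2 (by omega) (by omega) (by simp)
        (by intro j h1 h2 _; omega) (by omega)
    set R := pvLoopB (n.toNat + 1) n 1 1 with hR
    have hneq : n = F * (s * s) := by rw [← hFs]; ring
    have hsR : s ≤ R := hRmax s (by omega) ⟨F, by rw [hneq]; ring⟩
    have hRs : R ∣ s := pvKeyInt F s R hsf hs hR1 (by rw [← hneq]; exact hRdvd)
    have hRles : R ≤ s := Int.le_of_dvd hs hRs
    have hReq : R = s := by omega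
    rw [menor_factor_para_cuadrado_perfecto_alt, if_neg (by omega : ¬ n < 2)]
    simp only [← hR, hReq]
    rw [PySem.Int.floordiv_eq_ediv_of_pos (by positivity : (0:Int) < s * s), hneq]
    exact (Int.mul_ediv_cancel F (by positivity : (s:Int) * s ≠ 0)).symm

-- ===== VERDICT (by name: the statement is the Claim_ definition above) =====
theorem menor_factor_para_cuadrado_perfecto_spec : Claim_equal_menor_factor_para_cuadrado_perfecto := by
  unfold Claim_equal_menor_factor_para_cuadrado_perfecto
  intro n _
  unfold Spec_menor_factor_para_cuadrado_perfecto
  rw [pvA_eq_acc n, pvAcc_eq_alt n]
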